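-- pv_equiv track=rewrite | github.com/conuti-gmbh/maco-api-documentation | pythons/createPiFromTemplater/generate_schema.py | extract_components_from_paths
-- ===== SOURCE A (Python) =====
-- from typing import Dict, Any, List, Set, Tuple, Optional
--
-- def extract_components_from_paths(paths: Set[str]) -> Dict[str, Set[str]]:
--     """Extract top-level components from CSV paths."""
--     components = {}
--     for path in paths:
--         parts = path.split('.')
--         if len(parts) >= 2:  # Must have at least top-level and component
--             top_level = parts[0]
--             component = parts[1].split('[')[0]  # Remove array notation
--             if top_level not in components:
--                 components[top_level] = set()
--             components[top_level].add(component)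
--     return components
-- ===== SOURCE B (Python) =====
-- def extract_components_from_paths(paths):
--     """Extract top-level components from CSV paths.
--
--     Two-phase pipeline: normalize every path to a (top_level, component)
--     pair first, then group by distinct top_level keys in order of first
--     occurrence.
--     """
--     pairs = [(parts[0], parts[1].split('[')[0])
--              for parts in (p.split('.') for p in paths)
--              if len(parts) >= 2]
--     return {t: {c for k, c in pairs if k == t}
--             for t in dict.fromkeys(k for k, _ in pairs)}
-- ===== Notes on version B (the rewrite author's own statement) =====
-- stated objective: alternative
-- what changed: A builds the dict of sets incrementally while scanning the paths; B first normalizes every path to a (top_level, component) pair and then groups the pair list by its distinct top-level keys with comprehensions (normalize-then-group pipeline).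
import Mathlib
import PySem

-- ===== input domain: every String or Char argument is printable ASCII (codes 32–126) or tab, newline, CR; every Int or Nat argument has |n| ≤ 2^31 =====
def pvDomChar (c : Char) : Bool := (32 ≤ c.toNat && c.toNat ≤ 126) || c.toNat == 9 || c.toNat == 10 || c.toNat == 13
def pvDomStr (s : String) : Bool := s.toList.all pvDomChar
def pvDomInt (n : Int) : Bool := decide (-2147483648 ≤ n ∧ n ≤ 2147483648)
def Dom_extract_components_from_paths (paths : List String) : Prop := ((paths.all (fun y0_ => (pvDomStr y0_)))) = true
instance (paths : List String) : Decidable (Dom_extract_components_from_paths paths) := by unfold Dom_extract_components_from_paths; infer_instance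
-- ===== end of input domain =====

-- B replaces A's incremental dict-of-sets update by a two-phase pipeline (normalize every
-- path to a (top, component) pair, then group the pairs by their distinct top keys);
-- objective: alternative decomposition, same asymptotic cost on typical inputs, not faster.

-- ===== PORT A =====
-- path.split(sep) for a nonempty literal sep: Python never raises, so split? is always some
def pvSplit (s sep : String) : List String := (PySem.Str.split? s sep).getD []

-- one loop iteration of A: split, guard len>=2, ensure the key, add the component
def pvStepA (d : PySem.Dict String (PySem.Set String)) (path : String) :
    PySem.Dict String (PySem.Set String) :=
  match pvSplit path "." with
  | top :: second :: _ =>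
      let component : String := (pvSplit second "[").headD ""
      let d' := if d.contains top then d else d.insert top PySem.Set.empty
      d'.modify top PySem.Set.empty (fun s => PySem.Set.add s component)
  | _ => d

def extract_components_from_paths (paths : List String) : List (String × List String) :=
  (paths.foldl pvStepA PySem.Dict.empty).items

-- ===== PORT B =====
-- Source B's normalization: path -> (top_level, component) pair, or None if fewer than 2 parts
def pvParse (path : String) : Option (String × String) :=
  match pvSplit path "." with
  | top :: second :: _ => some (top, (pvSplit second "[").headD "")
  | _ => none

def extract_components_from_paths_alt (paths : List String) : List (String × List String) :=
  let pairs := paths.filterMap pvParse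
  (PySem.Set.ofList (pairs.map Prod.fst)).map
    (fun t => (t, PySem.Set.ofList ((pairs.filter (fun p => p.1 == t)).map Prod.snd)))

-- ===== PRECONDITION & SPEC =====
def Spec_extract_components_from_paths (paths : List String) (out : List (String × List String)) : Prop := out = extract_components_from_paths_alt paths
instance (paths : List String) (out : List (String × List String)) : Decidable (Spec_extract_components_from_paths paths out) := by unfold Spec_extract_components_from_paths; infer_instance

-- ===== CLAIM (what is proved, stated in full; the proofs are below) =====
def Claim_equal_extract_components_from_paths : Prop := ∀ (paths : List String), Dom_extract_components_from_paths paths → Spec_extract_components_from_paths paths (extract_components_from_paths paths)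

-- ===== LEMMAS AND PROOFS =====

-- on a path with at least two '.'-parts, A's step behaves like "add the key, add the component"
lemma pvStepA_of_parse_some (d : PySem.Dict String (PySem.Set String)) (path top c : String)
    (h : pvParse path = some (top, c)) :
    (pvStepA d path).keys = PySem.Set.add d.keys top ∧
    ∀ t, (pvStepA d path).getD t PySem.Set.empty =
      if t = top then PySem.Set.add (d.getD top PySem.Set.empty) c
      else d.getD t PySem.Set.empty := by
  unfold pvParse at h
  unfold pvStepA
  rcases hs : pvSplit path "." with _ | ⟨a, _ | ⟨b, rest⟩⟩ <;> rw [hs] at h <;>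
    simp only [Option.some.injEq, Prod.mk.injEq, reduceCtorEq] at h
  obtain ⟨ha, hc⟩ := h
  subst ha
  subst hc
  dsimp only
  by_cases hcon : d.contains a = true
  · constructor
    · rw [if_pos hcon, PySem.Dict.keys_modify, PySem.Dict.keys_insert_of_contains _ _ hcon,
        PySem.Set.add_of_mem ((PySem.Dict.contains_iff_mem_keys d a).mp hcon)]
    · intro t
      rw [if_pos hcon, PySem.Dict.getD_modify]
  · rw [if_neg hcon]
    have hcf : d.contains a = false := by simpa using hcon
    constructor
    · rw [PySem.Dict.keys_modify,
        PySem.Dict.keys_insert_of_contains _ _ (PySem.Dict.contains_insert_self d a PySem.Set.empty),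
        PySem.Dict.keys_insert_of_not_contains _ _ hcf,
        PySem.Set.add_of_not_mem]
      intro hm
      rw [(PySem.Dict.contains_iff_mem_keys d a).mpr hm] at hcf
      exact absurd hcf (by simp)
    · intro t
      rw [PySem.Dict.getD_modify]
      by_cases ht : t = a
      · subst ht
        rw [if_pos rfl, if_pos rfl, PySem.Dict.getD_insert,
          PySem.Dict.getD_of_not_contains d _ hcf]
        simp
      · rw [if_neg ht, if_neg ht, PySem.Dict.getD_insert, if_neg ht]

-- a path with fewer than two parts leaves A's dict unchanged
lemma pvStepA_of_parse_none (d : PySem.Dict String (PySem.Set String)) (path : String)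
    (h : pvParse path = none) : pvStepA d path = d := by
  unfold pvParse at h
  unfold pvStepA
  rcases hs : pvSplit path "." with _ | ⟨a, _ | ⟨b, rest⟩⟩ <;> rw [hs] at h
  all_goals simp at h ⊢

-- the keys of A's dict are the distinct top levels, in first-occurrence order
lemma pvFoldA_keys (ps : List String) :
    ∀ d : PySem.Dict String (PySem.Set String),
      (ps.foldl pvStepA d).keys =
        PySem.Set.update d.keys ((ps.filterMap pvParse).map Prod.fst) := by
  induction ps with
  | nil => intro d; simp [PySem.Set.update]
  | cons p ps ih =>
      intro d
      rcases hp : pvParse p with _ | ⟨t, c⟩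
      · simp only [List.foldl_cons, List.filterMap_cons, hp]
        rw [pvStepA_of_parse_none d p hp]; exact ih d
      · simp only [List.foldl_cons, List.filterMap_cons, hp, List.map_cons]
        rw [ih (pvStepA d p), PySem.Set.update_cons,
          (pvStepA_of_parse_some d p t c hp).1]

-- the value at any key is the fold of Set.add over that key's components
lemma pvFoldA_getD (ps : List String) :
    ∀ (d : PySem.Dict String (PySem.Set String)) (t : String),
      (ps.foldl pvStepA d).getD t PySem.Set.empty =
        ((((ps.filterMap pvParse).filter (fun p => p.1 == t)).map Prod.snd)).foldl
          PySem.Set.add (d.getD t PySem.Set.empty) := by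
  induction ps with
  | nil => intro d t; simp
  | cons p ps ih =>
      intro d t
      rcases hp : pvParse p with _ | ⟨top, c⟩
      · simp only [List.foldl_cons, List.filterMap_cons, hp]
        rw [pvStepA_of_parse_none d p hp]; exact ih d t
      · simp only [List.foldl_cons, List.filterMap_cons, hp, List.filter_cons]
        rw [ih (pvStepA d p) t, (pvStepA_of_parse_some d p top c hp).2 t]
        by_cases ht : t = top
        · subst ht; simp
        · have : ((top, c).1 == t) = false := by
            simp only [beq_eq_false_iff_ne, ne_eq]
            exact fun h => ht h.symm
          simp [this, ht]

-- key uniqueness is preserved along A's loop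
lemma pvFoldA_nodup (ps : List String) :
    ∀ d : PySem.Dict String (PySem.Set String), d.keys.Nodup →
      (ps.foldl pvStepA d).keys.Nodup := by
  induction ps with
  | nil => intro d hd; simpa using hd
  | cons p ps ih =>
      intro d hd
      rcases hp : pvParse p with _ | ⟨t, c⟩
      · simp only [List.foldl_cons]
        rw [pvStepA_of_parse_none d p hp]; exact ih d hd
      · simp only [List.foldl_cons]
        refine ih _ ?_
        rw [(pvStepA_of_parse_some d p t c hp).1]
        exact PySem.Set.nodup_add _ _ hd

-- ===== VERDICT (by name: the statement is the Claim_ definition above) =====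
theorem extract_components_from_paths_spec : Claim_equal_extract_components_from_paths := by
  unfold Claim_equal_extract_components_from_paths
  intro paths _
  unfold Spec_extract_components_from_paths
  unfold extract_components_from_paths extract_components_from_paths_alt
  have hnd : (paths.foldl pvStepA PySem.Dict.empty).keys.Nodup :=
    pvFoldA_nodup paths PySem.Dict.empty (by simp [PySem.Dict.keys_empty])
  rw [PySem.Dict.items_eq_map_keys _ hnd PySem.Set.empty, pvFoldA_keys paths PySem.Dict.empty]
  rw [PySem.Dict.keys_empty, PySem.Set.update_nil_left]
  congr 1
  funext t
  rw [pvFoldA_getD paths PySem.Dict.empty t, PySem.Dict.getD_empty, PySem.Set.ofList_eq_foldl]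
  rfl
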